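-- pv_equiv track=rewrite | github.com/GreenItay/Ex11 | ex11_utils.py | is_neighboring
-- ===== SOURCE A (Python) =====
-- def is_neighboring(block1, index_of_other_block, path):
--     """
--     this function returns true if either on of the blocks is at distance of 1 from the other,
--     False otherwise
--     """
--
--     if(index_of_other_block == -1):
--         return True
--     block2 = path[index_of_other_block]
--     for i in range(3):
--         for j in range(3):
--             if(block1 == (block2[0] - 1 + i, block2[1] - 1 + j)):
--                 return True
--     return False
-- ===== SOURCE B (Python) =====
-- def is_neighboring(block1, index_of_other_block, path):
--     if index_of_other_block == -1:
--         return True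
--     block2 = path[index_of_other_block]
--     return abs(block1[0] - block2[0]) <= 1 and abs(block1[1] - block2[1]) <= 1
-- ===== Notes on version B (the rewrite author's own statement) =====
-- stated objective: simpler
-- what changed: Replaces the 3x3 enumeration of all nine neighbor offsets with a closed-form Chebyshev distance test abs(dx)<=1 and abs(dy)<=1.
import Mathlib
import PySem

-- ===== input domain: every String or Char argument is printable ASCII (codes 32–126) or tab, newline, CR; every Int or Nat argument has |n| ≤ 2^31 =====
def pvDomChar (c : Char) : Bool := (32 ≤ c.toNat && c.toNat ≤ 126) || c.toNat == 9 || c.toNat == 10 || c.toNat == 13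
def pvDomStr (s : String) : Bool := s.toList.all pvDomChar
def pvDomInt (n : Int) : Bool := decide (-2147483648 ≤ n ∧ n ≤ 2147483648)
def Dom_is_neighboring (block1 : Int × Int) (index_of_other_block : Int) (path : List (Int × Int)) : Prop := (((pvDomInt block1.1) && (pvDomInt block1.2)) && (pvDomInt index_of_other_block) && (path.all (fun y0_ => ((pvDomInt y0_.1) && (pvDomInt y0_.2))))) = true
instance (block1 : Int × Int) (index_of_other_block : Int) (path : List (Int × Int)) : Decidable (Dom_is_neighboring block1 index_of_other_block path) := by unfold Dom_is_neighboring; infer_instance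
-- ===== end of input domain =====

-- B replaces A's 3x3 enumeration of neighbor offsets with a closed-form Chebyshev distance test (objective: simpler).
-- ===== PORT A =====
def is_neighboring (block1 : Int × Int) (index_of_other_block : Int) (path : List (Int × Int)) : Bool :=
  if index_of_other_block == -1 then true
  else
    match PySem.List.pyGet? path index_of_other_block with
    | none => false  -- IndexError; excluded by Pre_
    | some block2 =>
      (PySem.List.pyRange 0 3 1).any (fun i =>
        (PySem.List.pyRange 0 3 1).any (fun j =>
          block1 == (block2.1 - 1 + i, block2.2 - 1 + j)))

-- ===== PORT B =====
def is_neighboring_alt (block1 : Int × Int) (index_of_other_block : Int) (path : List (Int × Int)) : Bool :=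
  if index_of_other_block == -1 then true
  else
    match PySem.List.pyGet? path index_of_other_block with
    | none => false  -- IndexError; excluded by Pre_
    | some block2 =>
      decide (|block1.1 - block2.1| ≤ 1) && decide (|block1.2 - block2.2| ≤ 1)

-- ===== PRECONDITION & SPEC =====
-- Pre_ excludes exactly the inputs where Python A raises IndexError (index out of range and not -1).
def Pre_is_neighboring (block1 : Int × Int) (index_of_other_block : Int) (path : List (Int × Int)) : Prop :=
  index_of_other_block = -1 ∨ PySem.Raise.InRange path.length index_of_other_block
instance (block1 : Int × Int) (index_of_other_block : Int) (path : List (Int × Int)) : Decidable (Pre_is_neighboring block1 index_of_other_block path) := by unfold Pre_is_neighboring; infer_instance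
def pvWitness_is_neighboring : (Int × Int) × Int × (List (Int × Int)) := ((2, 3), 0, [(1, 3)])

def Spec_is_neighboring (block1 : Int × Int) (index_of_other_block : Int) (path : List (Int × Int)) (out : Bool) : Prop := out = is_neighboring_alt block1 index_of_other_block path
instance (block1 : Int × Int) (index_of_other_block : Int) (path : List (Int × Int)) (out : Bool) : Decidable (Spec_is_neighboring block1 index_of_other_block path out) := by unfold Spec_is_neighboring; infer_instance

-- ===== CLAIM (what is proved, stated in full; the proofs are below) =====
def Claim_equal_is_neighboring : Prop := ∀ (block1 : Int × Int) (index_of_other_block : Int) (path : List (Int × Int)), Dom_is_neighboring block1 index_of_other_block path → Pre_is_neighboring block1 index_of_other_block path → Spec_is_neighboring block1 index_of_other_block path (is_neighboring block1 index_of_other_block path)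

-- ===== LEMMAS AND PROOFS =====

-- ===== VERDICT (by name: the statement is the Claim_ definition above) =====
-- For a fixed center, membership of the 3x3 offset grid is the Chebyshev test.
lemma grid_eq_chebyshev (b1 b2 : Int × Int) :
    ((PySem.List.pyRange 0 3 1).any (fun i =>
      (PySem.List.pyRange 0 3 1).any (fun j =>
        b1 == (b2.1 - 1 + i, b2.2 - 1 + j))))
    = (decide (|b1.1 - b2.1| ≤ 1) && decide (|b1.2 - b2.2| ≤ 1)) := by
  obtain ⟨x, y⟩ := b1
  obtain ⟨u, v⟩ := b2
  have hr : PySem.List.pyRange 0 3 1 = [0, 1, 2] := by decide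
  rw [Bool.eq_iff_iff]
  simp only [hr, List.any_cons, List.any_nil, Bool.or_eq_true, Bool.or_false,
    beq_iff_eq, Prod.mk.injEq, Bool.and_eq_true, decide_eq_true_eq, abs_le]
  omega

theorem is_neighboring_spec : Claim_equal_is_neighboring := by
  intro b1 idx path _ _
  unfold Spec_is_neighboring is_neighboring is_neighboring_alt
  by_cases h : idx == -1
  · simp [h]
  · simp only [h]
    cases PySem.List.pyGet? path idx with
    | none => rfl
    | some b2 => exact grid_eq_chebyshev b1 b2
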